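-- pv_equiv track=rewrite | github.com/ksye6/ksye6 | MSDM5002基础Python可视化/课件/L4/7. Solve_XYZ_Check_Complexity.py | func_check
-- ===== SOURCE A (Python) =====
-- def func_check(xx,yy,zz):
--     get_result=0
--     for x in xx:
--         for y in yy:
--             for z in zz:
--                 if x**3+y**3+z**3 == The_number:
--                     get_result=1
--                     return x,y,z,get_result
--     return x,y,z,get_result
--
-- The_number=13
-- ===== SOURCE B (Python) =====
-- The_number = 13
--
-- def func_check(xx, yy, zz):
--     # cube -> first z in zz with that cube: fill back-to-front so earlier z overwrite later ones
--     first_z = {}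
--     for z in reversed(zz):
--         first_z[z ** 3] = z
--     hit = next(((x, y, first_z[The_number - x ** 3 - y ** 3])
--                 for x in xx for y in yy
--                 if The_number - x ** 3 - y ** 3 in first_z), None)
--     if hit is not None:
--         return (*hit, 1)
--     return xx[-1], yy[-1], zz[-1], 0
-- ===== Notes on version B (the rewrite author's own statement) =====
-- stated objective: faster
-- what changed: Builds a cube->first-z dict once (filled back-to-front with overwrite) and replaces A's three nested loops by a single generator search over the (x,y) product with an O(1) lookup.
-- outside the precondition, e.g. on func_check([], [1], [1]): A raises UnboundLocalError, B raises IndexError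
import Mathlib
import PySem

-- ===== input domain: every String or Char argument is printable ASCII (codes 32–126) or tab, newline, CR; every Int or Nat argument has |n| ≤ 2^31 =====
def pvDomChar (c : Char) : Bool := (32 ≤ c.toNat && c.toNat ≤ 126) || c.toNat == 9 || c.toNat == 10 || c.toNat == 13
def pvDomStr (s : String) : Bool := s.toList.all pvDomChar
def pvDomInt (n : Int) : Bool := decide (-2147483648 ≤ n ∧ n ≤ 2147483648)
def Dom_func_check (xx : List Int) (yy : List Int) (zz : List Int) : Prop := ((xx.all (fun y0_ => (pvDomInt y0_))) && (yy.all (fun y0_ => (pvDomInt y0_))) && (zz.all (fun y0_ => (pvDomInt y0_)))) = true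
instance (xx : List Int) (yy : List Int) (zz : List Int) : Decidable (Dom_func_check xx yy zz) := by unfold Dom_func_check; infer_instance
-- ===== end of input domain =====

-- B builds a cube→first-z dict once and searches the flat (x,y) product with a lookup: O(|zz|+|xx||yy|) vs A's O(|xx||yy||zz|).

-- ===== PORT A =====
-- innermost 'for z in zz' with the early return
def aLoopZ (x y : Int) : List Int → Option Int
  | [] => none
  | z :: zs => if x ^ 3 + y ^ 3 + z ^ 3 = 13 then some z else aLoopZ x y zs

-- 'for y in yy'
def aLoopY (x : Int) (zz : List Int) : List Int → Option (Int × Int)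
  | [] => none
  | y :: ys =>
    match aLoopZ x y zz with
    | some z => some (y, z)
    | none => aLoopY x zz ys

-- 'for x in xx'
def aLoopX (yy zz : List Int) : List Int → Option (Int × Int × Int)
  | [] => none
  | x :: xs =>
    match aLoopY x zz yy with
    | some (y, z) => some (x, y, z)
    | none => aLoopX yy zz xs

-- early return gives (x,y,z,1); falling through all loops returns the last loop values and 0
def func_check (xx : List Int) (yy : List Int) (zz : List Int) : List Int :=
  match aLoopX yy zz xx with
  | some (x, y, z) => [x, y, z, 1]
  | none => [xx.getLastD 0, yy.getLastD 0, zz.getLastD 0, 0]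

-- ===== PORT B =====
-- for z in reversed(zz): first_z[z**3] = z   (overwrite: earliest z wins)
def bIndex (zz : List Int) : PySem.Dict Int Int :=
  zz.reverse.foldl (fun d z => d.insert (z ^ 3) z) PySem.Dict.empty

-- the generator 'for x in xx for y in yy' as a flat product, searched once with next(…, None)
def func_check_alt (xx : List Int) (yy : List Int) (zz : List Int) : List Int :=
  match (xx.flatMap (fun x => yy.map (fun y => (x, y)))).findSome?
      (fun p => ((bIndex zz).get? (13 - p.1 ^ 3 - p.2 ^ 3)).map (fun z => (p.1, p.2, z))) with
  | some (x, y, z) => [x, y, z, 1]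
  | none => [xx.getLastD 0, yy.getLastD 0, zz.getLastD 0, 0]

-- ===== PRECONDITION & SPEC =====
-- Pre_ excludes an empty xx, yy or zz: there Python A raises UnboundLocalError at the final
-- 'return x,y,z,get_result' (a loop variable is unbound), so A returns no value.
def Pre_func_check (xx : List Int) (yy : List Int) (zz : List Int) : Prop :=
  xx ≠ [] ∧ yy ≠ [] ∧ zz ≠ []
instance (xx : List Int) (yy : List Int) (zz : List Int) : Decidable (Pre_func_check xx yy zz) := by unfold Pre_func_check; infer_instance

def pvWitness_func_check : List Int × List Int × List Int := ([1, 2], [0, -1], [2, 3])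

def Spec_func_check (xx : List Int) (yy : List Int) (zz : List Int) (out : List Int) : Prop := out = func_check_alt xx yy zz
instance (xx : List Int) (yy : List Int) (zz : List Int) (out : List Int) : Decidable (Spec_func_check xx yy zz out) := by unfold Spec_func_check; infer_instance

-- ===== CLAIM (what is proved, stated in full; the proofs are below) =====
def Claim_equal_func_check : Prop := ∀ (xx : List Int) (yy : List Int) (zz : List Int), Dom_func_check xx yy zz → Pre_func_check xx yy zz → Spec_func_check xx yy zz (func_check xx yy zz)

-- ===== LEMMAS AND PROOFS =====

-- first z in zz whose cube is c
def firstCube (c : Int) : List Int → Option Int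
  | [] => none
  | z :: zs => if z ^ 3 = c then some z else firstCube c zs

-- last z in zz whose cube is c
def lastCube (c : Int) : List Int → Option Int
  | [] => none
  | z :: zs =>
    match lastCube c zs with
    | some v => some v
    | none => if z ^ 3 = c then some z else none

theorem foldl_insert_get (c : Int) (l : List Int) : ∀ d : PySem.Dict Int Int,
    (l.foldl (fun d z => d.insert (z ^ 3) z) d).get? c
      = match lastCube c l with
        | some v => some v
        | none => d.get? c := by
  induction l with
  | nil => intro d; simp [lastCube]
  | cons z zs ih =>
    intro d
    simp only [List.foldl_cons, ih]
    cases h : lastCube c zs with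
    | some v => simp [lastCube, h]
    | none =>
      by_cases he : z ^ 3 = c
      · subst he; simp [lastCube, h, PySem.Dict.get?_insert_self]
      · rw [PySem.Dict.get?_insert_of_ne d z (Ne.symm he)]
        simp [lastCube, h, he]

theorem lastCube_append (c : Int) (a b : List Int) :
    lastCube c (a ++ b)
      = match lastCube c b with
        | some v => some v
        | none => lastCube c a := by
  induction a with
  | nil => cases h : lastCube c b <;> simp [lastCube, h]
  | cons z zs ih =>
    simp only [List.cons_append, lastCube, ih]
    cases lastCube c b <;> cases lastCube c zs <;> simp

theorem lastCube_reverse (c : Int) (l : List Int) :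
    lastCube c l.reverse = firstCube c l := by
  induction l with
  | nil => rfl
  | cons z zs ih =>
    simp only [List.reverse_cons, lastCube_append, lastCube, firstCube, ih]
    by_cases he : z ^ 3 = c <;> cases h : firstCube c zs <;> simp [he]

-- the dict built by B answers 'first z in zz with z³ = c'
theorem bIndex_get (c : Int) (zz : List Int) : (bIndex zz).get? c = firstCube c zz := by
  rw [bIndex, foldl_insert_get, lastCube_reverse]
  cases h : firstCube c zz <;> simp [PySem.Dict.get?_empty]

-- A's inner z-loop is exactly that first-cube search at c = 13 - x³ - y³
theorem aLoopZ_eq_firstCube (x y : Int) (zz : List Int) :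
    aLoopZ x y zz = firstCube (13 - x ^ 3 - y ^ 3) zz := by
  induction zz with
  | nil => rfl
  | cons z zs ih =>
    simp only [aLoopZ, firstCube, ih]
    congr 1
    have : (x ^ 3 + y ^ 3 + z ^ 3 = 13) ↔ (z ^ 3 = 13 - x ^ 3 - y ^ 3) := by omega
    simp [this]

-- B's search over the y-slice of the product equals A's y-loop, tagged with x
theorem findSome_map_eq_aLoopY (zz : List Int) (x : Int) (ys : List Int) :
    (ys.map (fun y => (x, y))).findSome?
        (fun p => ((bIndex zz).get? (13 - p.1 ^ 3 - p.2 ^ 3)).map (fun z => (p.1, p.2, z)))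
      = (aLoopY x zz ys).map (fun q => (x, q)) := by
  induction ys with
  | nil => rfl
  | cons y ys ih =>
    rw [List.map_cons, List.findSome?_cons, bIndex_get, ← aLoopZ_eq_firstCube]
    cases h : aLoopZ x y zz with
    | some z => simp [aLoopY, h]
    | none => simp [aLoopY, h, ih]

-- B's single search over the flat product equals A's nested x-loop
theorem findSome_flat_eq_aLoopX (zz yy : List Int) (xs : List Int) :
    (xs.flatMap (fun x => yy.map (fun y => (x, y)))).findSome?
        (fun p => ((bIndex zz).get? (13 - p.1 ^ 3 - p.2 ^ 3)).map (fun z => (p.1, p.2, z)))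
      = aLoopX yy zz xs := by
  induction xs with
  | nil => rfl
  | cons x xs ih =>
    simp only [List.flatMap_cons, List.findSome?_append, findSome_map_eq_aLoopY, aLoopX]
    cases h : aLoopY x zz yy with
    | some q => simp
    | none => simp [ih]

-- ===== VERDICT (by name: the statement is the Claim_ definition above) =====
theorem func_check_spec : Claim_equal_func_check := by
  intro xx yy zz _ _
  unfold Spec_func_check func_check func_check_alt
  rw [findSome_flat_eq_aLoopX]
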